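-- pv_equiv track=rewrite | github.com/jmsaavedrar/programacion | M3/ej_6.py | crear_listas_por_comunas
-- ===== SOURCE A (Python) =====
-- def crear_listas_por_comunas(personas, comunas) :
--     dic = {}
--     for i, comuna in enumerate(comunas) :
--         if comuna in dic :
--             dic[comuna].append(personas[i])
--         else :
--             dic[comuna] = [personas[i]]
--     return dic
-- ===== SOURCE B (Python) =====
-- def crear_listas_por_comunas(personas, comunas):
--     # Two shaped passes: distinct comunas in first-seen order, then one bucket
--     # comprehension per comuna, indexing personas positionally.
--     distinct = list(dict.fromkeys(comunas))
--     return {c: [personas[i] for i in range(len(comunas)) if comunas[i] == c]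
--             for c in distinct}
-- ===== Notes on version B (the rewrite author's own statement) =====
-- stated objective: alternative
-- what changed: Replaces the single incremental dict-building loop (conditional append/insert per element) with two shaped passes: first the distinct comunas in first-seen order via dict.fromkeys, then one positional filter comprehension per distinct comuna.
import Mathlib
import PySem

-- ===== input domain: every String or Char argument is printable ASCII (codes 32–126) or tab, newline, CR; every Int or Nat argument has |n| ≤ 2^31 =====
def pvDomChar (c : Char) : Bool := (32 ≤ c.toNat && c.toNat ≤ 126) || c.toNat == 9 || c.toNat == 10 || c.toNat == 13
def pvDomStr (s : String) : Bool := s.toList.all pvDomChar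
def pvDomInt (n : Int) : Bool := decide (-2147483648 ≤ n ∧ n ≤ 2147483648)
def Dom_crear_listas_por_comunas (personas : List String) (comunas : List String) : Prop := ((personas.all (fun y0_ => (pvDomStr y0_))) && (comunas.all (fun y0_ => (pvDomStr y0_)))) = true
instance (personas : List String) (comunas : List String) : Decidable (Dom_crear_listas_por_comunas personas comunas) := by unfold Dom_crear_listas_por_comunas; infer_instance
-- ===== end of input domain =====

-- B replaces A's incremental dict loop by two shaped passes (distinct comunas
-- in first-seen order, then one positional filter per comuna); alternative
-- decomposition, same return value on the stated domain.


-- ===== PORT A =====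
-- for i, comuna in enumerate(comunas): append personas[i] to dic[comuna] or start a new bucket
def crear_listas_por_comunas (personas : List String) (comunas : List String) : List (String × List String) :=
  ((PySem.List.enumerate comunas 0).foldl
    (fun dic ic =>
      if dic.contains ic.2 then
        dic.modify ic.2 [] (fun l => l ++ [PySem.List.pyGetD personas ic.1 ""])
      else
        dic.insert ic.2 [PySem.List.pyGetD personas ic.1 ""])
    PySem.Dict.empty).items

-- ===== PORT B =====
-- distinct = list(dict.fromkeys(comunas)); then a positional bucket comprehension per comuna
def crear_listas_por_comunas_alt (personas : List String) (comunas : List String) : List (String × List String) :=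
  let distinct := PySem.List.dedup comunas
  distinct.map (fun c => (c,
    ((PySem.List.pyRange 0 (comunas.length : Int) 1).filter
        (fun i => PySem.List.pyGetD comunas i "" == c)).map
      (fun i => PySem.List.pyGetD personas i "")))

-- ===== PRECONDITION & SPEC =====
-- A indexes personas positionally for every index of comunas, so it raises
-- IndexError whenever personas is shorter than comunas; Pre_ excludes exactly those inputs.
def Pre_crear_listas_por_comunas (personas : List String) (comunas : List String) : Prop :=
  comunas.length ≤ personas.length
instance (personas : List String) (comunas : List String) : Decidable (Pre_crear_listas_por_comunas personas comunas) := by unfold Pre_crear_listas_por_comunas; infer_instance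
def pvWitness_crear_listas_por_comunas : List String × List String := (["ana", "bob", "eva"], ["c1", "c2", "c1"])

def Spec_crear_listas_por_comunas (personas : List String) (comunas : List String) (out : List (String × List String)) : Prop := out = crear_listas_por_comunas_alt personas comunas
instance (personas : List String) (comunas : List String) (out : List (String × List String)) : Decidable (Spec_crear_listas_por_comunas personas comunas out) := by unfold Spec_crear_listas_por_comunas; infer_instance

-- ===== CLAIM (what is proved, stated in full; the proofs are below) =====
def Claim_equal_crear_listas_por_comunas : Prop := ∀ (personas : List String) (comunas : List String), Dom_crear_listas_por_comunas personas comunas → Pre_crear_listas_por_comunas personas comunas → Spec_crear_listas_por_comunas personas comunas (crear_listas_por_comunas personas comunas)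

-- ===== LEMMAS AND PROOFS =====

-- A's conditional step is exactly the unconditional modify-with-default step.
theorem pv_step_eq (d : PySem.Dict String (List String)) (k : String) (x : String) :
    (if d.contains k then d.modify k [] (fun l => l ++ [x]) else d.insert k [x])
      = d.modify k [] (fun l => l ++ [x]) := by
  split_ifs with h
  · rfl
  · show d.insert k [x] = d.insert k (d.getD k [] ++ [x])
    rw [PySem.Dict.getD_of_not_contains (h := by simpa using h)]
    rfl

-- A's fold, rewritten as the modify-fold over (comuna, persona) pairs.
theorem pv_A_eq_pairs (personas comunas : List String) :
    crear_listas_por_comunas personas comunas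
      = ((((PySem.List.enumerate comunas 0).map
            (fun ic => (ic.2, PySem.List.pyGetD personas ic.1 ""))).foldl
          (fun d p => d.modify p.1 [] (fun l => l ++ [p.2])) PySem.Dict.empty)).items := by
  unfold crear_listas_por_comunas
  rw [List.foldl_map]
  congr 2
  funext d ic
  exact pv_step_eq d ic.2 (PySem.List.pyGetD personas ic.1 "")

theorem crear_listas_por_comunas_spec' (personas comunas : List String) :
    crear_listas_por_comunas personas comunas = crear_listas_por_comunas_alt personas comunas := by
  rw [pv_A_eq_pairs]
  set v : Int → String := fun i => PySem.List.pyGetD personas i "" with hv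
  set pairs : List (String × String) :=
    (PySem.List.enumerate comunas 0).map (fun ic => (ic.2, v ic.1)) with hpairs
  set D : PySem.Dict String (List String) :=
    pairs.foldl (fun d p => d.modify p.1 [] (fun l => l ++ [p.2])) PySem.Dict.empty with hD
  have hnodup : D.keys.Nodup := by
    rw [hD]
    exact PySem.Dict.nodup_keys_foldl_modify_key pairs Prod.fst []
      (fun d p => fun l => l ++ [p.2]) PySem.Dict.empty (by simp [PySem.Dict.keys_empty])
  have hkeys : D.keys = PySem.List.dedup comunas := by
    rw [hD, PySem.Dict.keys_foldl_modify_key]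
    have h1 : pairs.map Prod.fst = comunas := by
      rw [hpairs, List.map_map]
      exact PySem.List.map_snd_enumerate comunas 0
    rw [h1, PySem.Dict.keys_empty, PySem.List.dedup_eq_ofList]
    rfl
  have hgetD : ∀ c : String, D.getD c []
      = (pairs.filter (fun p => p.1 == c)).map Prod.snd := by
    intro c
    rw [hD, PySem.Dict.getD_foldl_modify_append, PySem.Dict.getD_empty]
    simp
  rw [PySem.Dict.items_eq_map_keys D hnodup [], hkeys]
  unfold crear_listas_por_comunas_alt
  apply List.map_congr_left
  intro c _
  refine Prod.ext rfl ?_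
  show D.getD c [] = _
  rw [hgetD c, hpairs,
    PySem.List.enumerate_eq_map_pyRange comunas ""]
  rw [List.map_map, List.filter_map, List.map_map]
  rfl

-- ===== VERDICT (by name: the statement is the Claim_ definition above) =====
theorem crear_listas_por_comunas_spec : Claim_equal_crear_listas_por_comunas := by
  intro personas comunas _ _
  exact crear_listas_por_comunas_spec' personas comunas
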